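-- pv_equiv track=rewrite | github.com/picasso653/codesignal_-codes | Interview Prep/replacing_old_substrings_in_multiple_sentences.py | solution
-- ===== SOURCE A (Python) =====
-- def solution(sentences, words):
--     res = []
--
--     for sentence, word in zip(sentences, words):
--         k = 0
--         new = ''
--         n = len(word)
--
--         while True:
--             idx = sentence.lower().find(word.lower(), k)  # Case-insensitive search
--             if idx == -1:
--                 break  # No more occurrences
--
--             new += sentence[k:idx]  # Add text before the found word
--             found_word = sentence[idx:idx + n]  # Reverse word while preserving case
--             reversed_word = found_word[::-1]
--             if found_word[0].isupper():
--                 reversed_word = reversed_word.capitalize()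
--             new += reversed_word
--             k = idx + n  # Move search forward
--
--         new += sentence[k:]  # Add remaining part of sentence
--         res.append(new)
--
--     return res
-- ===== SOURCE B (Python) =====
-- def solution(sentences, words):
--     def transform(sentence, word):
--         lw = word.lower()
--         n = len(word)
--         out = []
--         i = 0
--         while i < len(sentence):
--             chunk = sentence[i:i + n]
--             if chunk.lower() == lw:
--                 r = chunk[::-1]
--                 out.append(r.capitalize() if chunk[0].isupper() else r)
--                 i += n
--             else:
--                 out.append(sentence[i])
--                 i += 1
--         return ''.join(out)
--
--     return [transform(s, w) for s, w in zip(sentences, words)]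
-- ===== Notes on version B (the rewrite author's own statement) =====
-- stated objective: alternative
-- what changed: Replaces A's repeated sentence.lower().find(...) cursor loop (which re-lowercases the whole sentence on every occurrence and stitches slices between matches) by a single left-to-right scan that lowercases the word once and compares a lowered n-chunk at each position, emitting either the case-adjusted reversed chunk or one character.
import Mathlib
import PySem

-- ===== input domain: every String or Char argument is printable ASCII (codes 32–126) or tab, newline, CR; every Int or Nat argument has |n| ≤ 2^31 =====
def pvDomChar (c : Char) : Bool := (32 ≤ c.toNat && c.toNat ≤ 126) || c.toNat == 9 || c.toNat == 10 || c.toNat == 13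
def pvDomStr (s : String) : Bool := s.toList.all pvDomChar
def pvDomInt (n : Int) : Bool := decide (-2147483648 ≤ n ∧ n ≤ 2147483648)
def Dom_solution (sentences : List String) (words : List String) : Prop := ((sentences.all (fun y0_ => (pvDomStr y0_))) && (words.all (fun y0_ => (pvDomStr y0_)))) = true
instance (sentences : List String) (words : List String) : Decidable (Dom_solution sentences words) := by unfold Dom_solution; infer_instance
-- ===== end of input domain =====

-- B replaces A's repeated lower().find cursor loop by one left-to-right scan that lowers
-- the word once and tests a lowered chunk at each position (alternative algorithm, same values).


-- ===== PORT A =====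
-- Python str.capitalize(): first char upper-cased, the rest lower-cased (exact on ASCII)
def pyCapitalize (s : List Char) : List Char :=
  match s with
  | [] => []
  | c :: cs => PySem.Chars.upperChar c :: cs.map PySem.Chars.lowerChar

-- the `while True` loop of A; `fuel` only makes it total (the cursor k strictly
-- increases by n ≥ 1 per round, so fuel = len(sentence)+1 is never exhausted inside Pre_)
def solLoopA (s w : List Char) (n : Nat) (fuel : Nat) (k : Nat) (new : List Char) : List Char :=
  match fuel with
  | 0 => new ++ s.drop k
  | f + 1 =>
    -- idx = sentence.lower().find(word.lower(), k)
    let idx := PySem.Chars.findFrom (PySem.Chars.lower s) (PySem.Chars.lower w) (k : Int)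
    if idx = -1 then
      new ++ s.drop k                         -- break; then new += sentence[k:]
    else
      let i := idx.toNat
      let found := PySem.List.slice s (some (i : Int)) (some ((i : Int) + (n : Int)))  -- sentence[idx:idx+n]
      match PySem.List.pyGet? found 0 with    -- found_word[0]
      | none => new ++ s.drop k               -- Python raises IndexError here (word = '' only; outside Pre_)
      | some c0 =>
        let rev := found.reverse              -- found_word[::-1]
        let rev := if PySem.Chars.isupper c0 then pyCapitalize rev else rev
        solLoopA s w n f (i + n) (new ++ PySem.List.slice s (some (k : Int)) (some (i : Int)) ++ rev)

def solution (sentences : List String) (words : List String) : List String :=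
  (sentences.zip words).map (fun p =>
    let s := p.1.toList
    let w := p.2.toList
    String.ofList (solLoopA s w w.length (s.length + 1) 0 []))

-- ===== PORT B =====
-- Source B's while loop over the cursor i, rendered as structural recursion on the
-- suffix sentence[i:]; out/''.join becomes direct list append
def scanB (lw : List Char) (n : Nat) (s : List Char) : List Char :=
  match s with
  | [] => []
  | c :: rest =>
    let chunk := (c :: rest).take n           -- sentence[i:i+n]
    if PySem.Chars.lower chunk = lw then
      match h0 : PySem.List.pyGet? chunk 0 with    -- chunk[0]
      | none => c :: rest                     -- Python raises IndexError here (word = '' only; outside Pre_)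
      | some c0 =>
        let r := chunk.reverse                -- chunk[::-1]
        (if PySem.Chars.isupper c0 then pyCapitalize r else r) ++ scanB lw n ((c :: rest).drop n)
    else
      c :: scanB lw n rest
termination_by s.length
decreasing_by
  · have hn : 1 ≤ n := by
      by_contra hcon
      have hn0 : n = 0 := by omega
      simp only [chunk, hn0, List.take_zero, PySem.List.pyGet?, PySem.List.pyIdx?] at h0
      simp at h0
    simp only [List.length_drop, List.length_cons]
    omega
  · simp

def solution_alt (sentences : List String) (words : List String) : List String :=
  (sentences.zip words).map (fun p =>
    let w := p.2.toList
    String.ofList (scanB (PySem.Chars.lower w) w.length p.1.toList))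

-- ===== PRECONDITION & SPEC =====
-- Pre_ excludes exactly the inputs where some zipped pair has an empty word:
-- there Python A raises IndexError (found_word[0] on the empty slice).
def Pre_solution (sentences : List String) (words : List String) : Prop :=
  ∀ p ∈ sentences.zip words, p.2 ≠ ""
instance (sentences : List String) (words : List String) : Decidable (Pre_solution sentences words) := by unfold Pre_solution; infer_instance

def pvWitness_solution : List String × List String := (["Hello world hello", "aBc aBcab"], ["hello", "ab"])

def Spec_solution (sentences : List String) (words : List String) (out : List String) : Prop := out = solution_alt sentences words
instance (sentences : List String) (words : List String) (out : List String) : Decidable (Spec_solution sentences words out) := by unfold Spec_solution; infer_instance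

-- ===== CLAIM (what is proved, stated in full; the proofs are below) =====
def Claim_equal_solution : Prop := ∀ (sentences : List String) (words : List String), Dom_solution sentences words → Pre_solution sentences words → Spec_solution sentences words (solution sentences words)

-- ===== LEMMAS AND PROOFS =====

theorem lower_drop (s : List Char) (k : Nat) :
    PySem.Chars.lower (s.drop k) = (PySem.Chars.lower s).drop k := by
  simp [PySem.Chars.lower, List.map_drop]

theorem lower_take (s : List Char) (k : Nat) :
    PySem.Chars.lower (s.take k) = (PySem.Chars.lower s).take k := by
  simp [PySem.Chars.lower, List.map_take]

theorem lower_length (s : List Char) : (PySem.Chars.lower s).length = s.length := by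
  simp [PySem.Chars.lower]

-- no case-insensitive occurrence anywhere ⇒ the scan copies the sentence
theorem scanB_not_infix (lw : List Char) (n : Nat) (s : List Char)
    (h : ¬ lw <:+: PySem.Chars.lower s) :
    scanB lw n s = s := by
  induction s with
  | nil => simp [scanB]
  | cons c rest ih =>
    rw [scanB]
    simp only []
    have hne : ¬ PySem.Chars.lower ((c :: rest).take n) = lw := by
      intro heq
      have hp : (PySem.Chars.lower (c :: rest)).take n <+: PySem.Chars.lower (c :: rest) :=
        List.take_prefix n (PySem.Chars.lower (c :: rest))
      rw [← lower_take, heq] at hp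
      exact h hp.isInfix
    rw [if_neg hne, ih]
    intro hinf
    apply h
    have h2 : lw <:+: PySem.Chars.lowerChar c :: PySem.Chars.lower rest := List.infix_cons hinf
    simpa [PySem.Chars.lower] using h2

-- no match in the first j positions ⇒ the scan copies those j characters
theorem scanB_skip (lw : List Char) (n : Nat) :
    ∀ (j : Nat) (s : List Char), j ≤ s.length →
      (∀ i < j, ¬ lw <+: (PySem.Chars.lower s).drop i) →
      scanB lw n s = s.take j ++ scanB lw n (s.drop j) := by
  intro j
  induction j with
  | zero => intro s _ _; simp
  | succ m ih =>
    intro s hj hno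
    match s with
    | [] => simp at hj
    | c :: rest =>
      rw [scanB]
      simp only []
      have hne : ¬ PySem.Chars.lower ((c :: rest).take n) = lw := by
        intro heq
        apply hno 0 (Nat.succ_pos m)
        have hp : (PySem.Chars.lower (c :: rest)).take n <+: PySem.Chars.lower (c :: rest) :=
          List.take_prefix n (PySem.Chars.lower (c :: rest))
        rw [← lower_take, heq] at hp
        simpa using hp
      rw [if_neg hne]
      have : scanB lw n rest = rest.take m ++ scanB lw n (rest.drop m) := by
        apply ih rest (by simpa using hj)
        intro i hi
        have := hno (i + 1) (by omega)
        simpa [PySem.Chars.lower] using this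
      simp [this]

-- the A-loop equals the scan of the remaining suffix
theorem loopA_eq_scanB (s w : List Char) (hw : w ≠ []) :
    ∀ (fuel k : Nat) (new : List Char), k ≤ s.length → s.length - k < fuel →
      solLoopA s w w.length fuel k new
        = new ++ scanB (PySem.Chars.lower w) w.length (s.drop k) := by
  intro fuel
  induction fuel with
  | zero => intro k new _ hf; omega
  | succ f ih =>
    intro k new hk hf
    have hlw : PySem.Chars.lower w ≠ [] := by
      simp [PySem.Chars.lower]; exact hw
    have hlwlen : (PySem.Chars.lower w).length = w.length := lower_length w
    have hklow : k ≤ (PySem.Chars.lower s).length := by rw [lower_length]; exact hk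
    rw [solLoopA]
    by_cases hidx : PySem.Chars.findFrom (PySem.Chars.lower s) (PySem.Chars.lower w) (k : Int) = -1
    · rw [if_pos hidx]
      have hninf : ¬ PySem.Chars.lower w <:+: (PySem.Chars.lower s).drop k :=
        (PySem.Chars.findFrom_natCast_eq_neg_one_iff _ _ k hklow).mp hidx
      rw [scanB_not_infix _ _ _ (by rw [lower_drop]; exact hninf)]
    · obtain ⟨hki, hpre, hmin⟩ :=
        PySem.Chars.findFrom_natCast_spec (PySem.Chars.lower s) (PySem.Chars.lower w) k hklow hidx
      set idx := PySem.Chars.findFrom (PySem.Chars.lower s) (PySem.Chars.lower w) (k : Int) with hidxdef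
      have hki' : k ≤ idx.toNat := by omega
      set i := idx.toNat with hidef
      rw [if_neg hidx]
      simp only []
      -- the match occupies positions i … i + n - 1, all inside s
      have hlen : w.length ≤ s.length - i := by
        have := hpre.length_le
        simp [lower_length, hlwlen] at this
        omega
      have hn1 : 1 ≤ w.length := by cases w with | nil => exact absurd rfl hw | cons a l => simp
      have hile : i ≤ s.length := by omega
      -- found = s[i : i+n] = take n (drop i s), nonempty
      have hfound : PySem.List.slice s (some (i : Int)) (some ((i : Int) + (w.length : Int)))
          = (s.drop i).take w.length := by
        exact PySem.List.slice_natCast_add s i w.length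
      have hfoundlen : ((s.drop i).take w.length).length = w.length := by
        simp; omega
      obtain ⟨c0, tl, hcons⟩ : ∃ c0 tl, (s.drop i).take w.length = c0 :: tl := by
        cases hh : (s.drop i).take w.length with
        | nil => rw [hh] at hfoundlen; simp at hfoundlen; omega
        | cons a l => exact ⟨a, l, rfl⟩
      rw [hfound, hcons]
      have hget : PySem.List.pyGet? (c0 :: tl) (0 : Int) = some c0 := by
        simp [PySem.List.pyGet?, PySem.List.pyIdx?]
      rw [hget]
      -- B side: skip i - k characters, then one match step
      have hBskip : scanB (PySem.Chars.lower w) w.length (s.drop k)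
          = (s.drop k).take (i - k) ++ scanB (PySem.Chars.lower w) w.length (s.drop i) := by
        have := scanB_skip (PySem.Chars.lower w) w.length (i - k) (s.drop k)
          (by simp only [List.length_drop]; exact Nat.sub_le_sub_right hile k)
          (by intro j hj
              have := hmin (k + j) (by omega) (by omega)
              rw [lower_drop, List.drop_drop]
              exact this)
        rw [this, List.drop_drop]
        rw [show k + (i - k) = i by omega]
      -- the suffix at i begins with a match
      have hpre' : PySem.Chars.lower w <+: PySem.Chars.lower (s.drop i) := by
        rw [lower_drop]; exact hpre
      have hchunk : PySem.Chars.lower ((s.drop i).take w.length) = PySem.Chars.lower w := by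
        have := List.prefix_iff_eq_take.mp hpre'
        rw [lower_take, ← hlwlen, ← this]
      obtain ⟨d, dl, hdl⟩ : ∃ d dl, s.drop i = d :: dl := by
        cases hh : s.drop i with
        | nil => rw [hh] at hcons; simp at hcons
        | cons a l => exact ⟨a, l, rfl⟩
      have hBmatch : scanB (PySem.Chars.lower w) w.length (s.drop i)
          = (if PySem.Chars.isupper c0 then pyCapitalize ((c0 :: tl).reverse) else (c0 :: tl).reverse)
              ++ scanB (PySem.Chars.lower w) w.length (s.drop (i + w.length)) := by
        rw [hdl, scanB]
        simp only []
        rw [← hdl]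
        rw [if_pos hchunk]
        split
        · rename_i h0
          rw [hcons] at h0
          rw [hget] at h0
          exact absurd h0 (by simp)
        · rename_i c0' h0
          rw [hcons] at h0
          rw [hget] at h0
          obtain rfl : c0 = c0' := Option.some.inj h0
          rw [hcons, List.drop_drop]
      -- A side: recurse via the induction hypothesis
      have hslice : PySem.List.slice s (some (k : Int)) (some (i : Int))
          = (s.drop k).take (i - k) := PySem.List.slice_natCast s k i
      split
      · rename_i habs
        simp at habs
      · rename_i c0' hsome
        obtain rfl : c0 = c0' := Option.some.inj hsome
        rw [ih (i + w.length) _ (by omega) (by omega)]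
        rw [hBskip, hBmatch, hslice]
        simp [List.append_assoc]

theorem pair_eq (a b : String) (hb : b ≠ "") :
    String.ofList (solLoopA a.toList b.toList b.toList.length (a.toList.length + 1) 0 [])
      = String.ofList (scanB (PySem.Chars.lower b.toList) b.toList.length a.toList) := by
  have hbl : b.toList ≠ [] := by
    intro h
    rw [String.toList_eq_nil_iff] at h
    exact hb h
  rw [loopA_eq_scanB a.toList b.toList hbl (a.toList.length + 1) 0 [] (by omega) (by omega)]
  simp

-- ===== VERDICT (by name: the statement is the Claim_ definition above) =====
theorem solution_spec : Claim_equal_solution := by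
  intro sentences words _ hpre
  unfold Spec_solution solution solution_alt
  apply List.map_congr_left
  intro p hp
  exact pair_eq p.1 p.2 (hpre p hp)
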